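-- pv_equiv track=rewrite | github.com/andresmaxi33/Python-Practica-2 | src/ejercicio7.py | validar_participantes
-- ===== SOURCE A (Python) =====
-- def validar_participantes(participantes):
--     if len(participantes) < 3:
--         return False
--
--     # Normalizar (minusculas) para comparar
--     normalizados = []
--     for nombre in participantes:
--         normalizados.append(nombre.lower())
--
--     # Ver duplicados
--     if len(normalizados) != len(set(normalizados)):
--         return False
--
--     return True
-- ===== SOURCE B (Python) =====
-- def validar_participantes(participantes):
--     if len(participantes) < 3:
--         return False
--     # Normalize, then sort and compare adjacent entries instead of set-dedup
--     normalizados = [nombre.lower() for nombre in participantes]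
--     normalizados.sort()
--     for i in range(1, len(normalizados)):
--         if normalizados[i] == normalizados[i - 1]:
--             return False
--     return True
-- ===== Notes on version B (the rewrite author's own statement) =====
-- stated objective: alternative
-- what changed: Replaced the set-based duplicate check (compare len(list) with len(set)) by sort-then-adjacent-compare over the lowercased names.
import Mathlib
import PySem

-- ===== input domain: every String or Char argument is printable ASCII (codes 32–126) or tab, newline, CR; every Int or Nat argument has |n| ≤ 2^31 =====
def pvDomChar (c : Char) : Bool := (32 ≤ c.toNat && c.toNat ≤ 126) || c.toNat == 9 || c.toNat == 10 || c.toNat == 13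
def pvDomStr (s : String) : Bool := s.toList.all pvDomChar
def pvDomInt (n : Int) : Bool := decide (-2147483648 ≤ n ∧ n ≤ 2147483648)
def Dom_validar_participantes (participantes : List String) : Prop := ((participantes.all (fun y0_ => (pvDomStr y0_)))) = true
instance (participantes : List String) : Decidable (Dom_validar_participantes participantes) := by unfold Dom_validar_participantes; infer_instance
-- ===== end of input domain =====

-- B replaces A's set-based duplicate check by sort-then-adjacent-compare (alternative decomposition, same results).

-- ===== PORT A =====
def validar_participantes (participantes : List String) : Bool :=
  if participantes.length < 3 then false
  else
    -- normalizados = []; for nombre in participantes: normalizados.append(nombre.lower())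
    let normalizados := participantes.foldl (fun acc nombre => acc ++ [PySem.Str.lower nombre]) []
    if normalizados.length ≠ (PySem.Set.ofList normalizados).length then false
    else true

-- ===== PORT B =====
-- for i in range(1, len(l)): if l[i] == l[i-1]: return False  — adjacent-pair scan
def pvNoAdjDup : List String → Bool
  | a :: b :: t => if a == b then false else pvNoAdjDup (b :: t)
  | _ => true

def validar_participantes_alt (participantes : List String) : Bool :=
  if participantes.length < 3 then false
  else
    let normalizados := participantes.map PySem.Str.lower
    pvNoAdjDup (PySem.List.sorted normalizados (fun x => x) false)

-- ===== PRECONDITION & SPEC =====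
def Spec_validar_participantes (participantes : List String) (out : Bool) : Prop := out = validar_participantes_alt participantes
instance (participantes : List String) (out : Bool) : Decidable (Spec_validar_participantes participantes out) := by unfold Spec_validar_participantes; infer_instance

-- ===== CLAIM (what is proved, stated in full; the proofs are below) =====
def Claim_equal_validar_participantes : Prop := ∀ (participantes : List String), Dom_validar_participantes participantes → Spec_validar_participantes participantes (validar_participantes participantes)

-- ===== LEMMAS AND PROOFS =====

theorem pv_foldl_append_eq_map (xs : List String) (acc : List String) :
    xs.foldl (fun acc nombre => acc ++ [PySem.Str.lower nombre]) acc = acc ++ xs.map PySem.Str.lower := by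
  induction xs generalizing acc with
  | nil => simp
  | cons x xs ih => simp [List.foldl, ih]

-- Set.ofList xs is a sublist of xs (accumulator-generalized form).
theorem pv_foldl_add_sublist (xs s : List String) :
    ∃ t, xs.foldl PySem.Set.add s = s ++ t ∧ t.Sublist xs := by
  induction xs generalizing s with
  | nil => exact ⟨[], by simp⟩
  | cons x xs ih =>
    simp only [List.foldl]
    by_cases h : PySem.Set.contains s x
    · have : PySem.Set.add s x = s := by unfold PySem.Set.add; rw [if_pos h]
      rw [this]
      obtain ⟨t, ht, hs⟩ := ih s
      exact ⟨t, ht, hs.cons x⟩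
    · have : PySem.Set.add s x = s ++ [x] := by
        unfold PySem.Set.add; rw [if_neg (by simpa using h)]
      rw [this]
      obtain ⟨t, ht, hs⟩ := ih (s ++ [x])
      exact ⟨x :: t, by simpa using ht, hs.cons₂ x⟩

theorem pv_ofList_sublist (xs : List String) : (PySem.Set.ofList xs).Sublist xs := by
  obtain ⟨t, ht, hs⟩ := pv_foldl_add_sublist xs []
  simpa [PySem.Set.ofList_eq_foldl, ht] using hs

theorem pv_foldl_add_of_nodup (xs s : List String) (h : (s ++ xs).Nodup) :
    xs.foldl PySem.Set.add s = s ++ xs := by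
  induction xs generalizing s with
  | nil => simp
  | cons x xs ih =>
    have hx : x ∉ s := by
      intro hm
      have hdj := (List.nodup_append.mp h).2.2
      exact hdj x hm x (by simp) rfl
    have hadd : PySem.Set.add s x = s ++ [x] := by
      unfold PySem.Set.add
      rw [if_neg (by simpa [PySem.Set.contains] using hx)]
    simp only [List.foldl, hadd]
    have : ((s ++ [x]) ++ xs).Nodup := by simpa using h
    simpa using ih (s ++ [x]) this

theorem pv_len_ofList_iff (xs : List String) :
    xs.length = (PySem.Set.ofList xs).length ↔ xs.Nodup := by
  constructor
  · intro h
    have hsub := pv_ofList_sublist xs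
    have : PySem.Set.ofList xs = xs := hsub.eq_of_length h.symm
    rw [← this]
    exact PySem.Set.nodup_ofList xs
  · intro h
    have := pv_foldl_add_of_nodup xs [] (by simpa using h)
    simp [PySem.Set.ofList_eq_foldl, this]

-- On a ≤-sorted list, no adjacent duplicates ⇔ no duplicates at all.
theorem pv_noAdjDup_iff (l : List String) (hp : l.Pairwise (· ≤ ·)) :
    pvNoAdjDup l = true ↔ l.Nodup := by
  induction l with
  | nil => simp [pvNoAdjDup]
  | cons a t ih =>
    cases t with
    | nil => simp [pvNoAdjDup]
    | cons b t' =>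
      have hp' : (b :: t').Pairwise (· ≤ ·) := hp.tail
      by_cases hab : a = b
      · subst hab
        simp [pvNoAdjDup, List.nodup_cons]
      · have hab' : (a == b) = false := by simp [hab]
        rw [show pvNoAdjDup (a :: b :: t') = pvNoAdjDup (b :: t') by
              simp [pvNoAdjDup, hab'],
            ih hp']
        constructor
        · intro h2
          refine List.nodup_cons.mpr ⟨?_, h2⟩
          intro hmem
          have hle : ∀ y ∈ b :: t', a ≤ y := (List.pairwise_cons.mp hp).1
          rcases List.mem_cons.mp hmem with hmem | hmem
          · exact hab hmem
          · -- a ∈ t', but a < b and b ≤ every element of t'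
            have hlt : a < b := lt_of_le_of_ne (hle b (by simp)) hab
            have hbt : ∀ y ∈ t', b ≤ y := (List.pairwise_cons.mp hp').1
            exact absurd (lt_of_lt_of_le hlt (hbt a hmem)) (lt_irrefl a)
        · intro h2
          exact (List.nodup_cons.mp h2).2

-- ===== VERDICT (by name: the statement is the Claim_ definition above) =====
theorem validar_participantes_spec : Claim_equal_validar_participantes := by
  intro ps _
  unfold Spec_validar_participantes validar_participantes validar_participantes_alt
  by_cases hlen : ps.length < 3
  · simp [hlen]
  · simp only [hlen, if_false]
    set norm := ps.map PySem.Str.lower with hnorm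
    rw [pv_foldl_append_eq_map, List.nil_append]
    set s := PySem.List.sorted norm (fun x => x) false with hs
    have hperm : s.Perm norm := PySem.List.sorted_perm norm (fun x => x) false
    have hpair : s.Pairwise (· ≤ ·) := by
      simpa using PySem.List.sorted_pairwise norm (fun x => x)
    have h1 := pv_len_ofList_iff norm
    have h2 := pv_noAdjDup_iff s hpair
    have h3 : s.Nodup ↔ norm.Nodup := hperm.nodup_iff
    by_cases hd : norm.Nodup
    · rw [if_neg (not_ne_iff.mpr (h1.mpr hd))]
      exact (h2.mpr (h3.mpr hd)).symm
    · rw [if_pos (fun h => hd (h1.mp h))]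
      rcases Bool.eq_false_or_eq_true (pvNoAdjDup s) with h | h
      · exact absurd (h3.mp (h2.mp h)) hd
      · exact h.symm
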